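-- pv_equiv track=rewrite | github.com/scout719/adventOfCode | 2020/adventOfCode.py | day20_relative_position
-- ===== SOURCE A (Python) =====
-- def day20_relative_position(t1, t2):
--     R = len(t1)
--     C = len(t1[0])
--     if all([t1[r][0] == t2[r][C - 1] for r in range(R)]):
--         return "W"
--     if all([t1[r][C - 1] == t2[r][0] for r in range(R)]):
--         return "E"
--     if all([t1[0][c] == t2[R - 1][c] for c in range(C)]):
--         return "N"
--     if all([t1[R - 1][c] == t2[0][c] for c in range(C)]):
--         return "S"
--     return None
-- ===== SOURCE B (Python) =====
-- def day20_relative_position(t1, t2):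
--     R, C = len(t1), len(t1[0])
--     w = e = n = s = True
--     for k in range(max(R, C)):
--         if k < R:
--             w = w and t1[k][0] == t2[k][C - 1]
--             e = e and t1[k][C - 1] == t2[k][0]
--         if k < C:
--             n = n and t1[0][k] == t2[R - 1][k]
--             s = s and t1[R - 1][k] == t2[0][k]
--     for d, ok in (("W", w), ("E", e), ("N", n), ("S", s)):
--         if ok:
--             return d
--     return None
-- ===== Notes on version B (the rewrite author's own statement) =====
-- stated objective: alternative
-- what changed: B makes a single fused pass over k in range(max(R,C)) maintaining four boolean accumulators (one per direction) updated simultaneously, then picks the first direction whose flag survived, instead of A's four separate staged all()-comprehension checks.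
-- outside the precondition, e.g. on day20_relative_position([['a', 'b'], ['a']], [['b', 'a'], ['x', 'a']]): A returns 'W', B raises IndexError
import Mathlib
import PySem

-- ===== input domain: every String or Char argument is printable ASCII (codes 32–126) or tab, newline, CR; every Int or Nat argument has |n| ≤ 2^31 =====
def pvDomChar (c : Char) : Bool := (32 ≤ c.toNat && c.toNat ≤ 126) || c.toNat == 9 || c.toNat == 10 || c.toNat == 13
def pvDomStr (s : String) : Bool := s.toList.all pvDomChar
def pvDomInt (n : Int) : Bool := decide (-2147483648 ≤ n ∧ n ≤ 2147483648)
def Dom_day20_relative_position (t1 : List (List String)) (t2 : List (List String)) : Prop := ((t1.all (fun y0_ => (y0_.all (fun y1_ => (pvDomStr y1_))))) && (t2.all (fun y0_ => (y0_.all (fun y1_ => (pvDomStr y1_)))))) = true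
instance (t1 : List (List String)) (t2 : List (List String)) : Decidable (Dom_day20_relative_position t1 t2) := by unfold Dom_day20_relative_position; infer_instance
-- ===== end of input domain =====

-- B replaces A's four staged all()-comprehension checks by ONE fused pass over
-- k in range(max(R,C)) that maintains four boolean accumulators simultaneously
-- (objective: alternative decomposition; same cost).

-- ===== PORT A =====
-- literal transliteration of A; indexing inside Pre_ is always in range, rendered with pyGetD
def day20_relative_position (t1 : List (List String)) (t2 : List (List String)) : Option String :=
  let R : Int := t1.length
  let C : Int := (PySem.List.pyGetD t1 0 []).length
  if ((PySem.List.pyRange 0 R 1).map (fun r =>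
        decide (PySem.List.pyGetD (PySem.List.pyGetD t1 r []) 0 "" =
                PySem.List.pyGetD (PySem.List.pyGetD t2 r []) (C - 1) ""))).all (fun b => b) then
    some "W"
  else if ((PySem.List.pyRange 0 R 1).map (fun r =>
        decide (PySem.List.pyGetD (PySem.List.pyGetD t1 r []) (C - 1) "" =
                PySem.List.pyGetD (PySem.List.pyGetD t2 r []) 0 ""))).all (fun b => b) then
    some "E"
  else if ((PySem.List.pyRange 0 C 1).map (fun c =>
        decide (PySem.List.pyGetD (PySem.List.pyGetD t1 0 []) c "" =
                PySem.List.pyGetD (PySem.List.pyGetD t2 (R - 1) []) c ""))).all (fun b => b) then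
    some "N"
  else if ((PySem.List.pyRange 0 C 1).map (fun c =>
        decide (PySem.List.pyGetD (PySem.List.pyGetD t1 (R - 1) []) c "" =
                PySem.List.pyGetD (PySem.List.pyGetD t2 0 []) c ""))).all (fun b => b) then
    some "S"
  else
    none

-- ===== PORT B =====
-- Source B's fused loop body: one step of the four-flag accumulator
def pvStep (t1 : List (List String)) (t2 : List (List String)) (R C : Int)
    (acc : Bool × Bool × Bool × Bool) (k : Int) : Bool × Bool × Bool × Bool :=
  let w := if k < R then acc.1 && decide (PySem.List.pyGetD (PySem.List.pyGetD t1 k []) 0 "" =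
                PySem.List.pyGetD (PySem.List.pyGetD t2 k []) (C - 1) "") else acc.1
  let e := if k < R then acc.2.1 && decide (PySem.List.pyGetD (PySem.List.pyGetD t1 k []) (C - 1) "" =
                PySem.List.pyGetD (PySem.List.pyGetD t2 k []) 0 "") else acc.2.1
  let n := if k < C then acc.2.2.1 && decide (PySem.List.pyGetD (PySem.List.pyGetD t1 0 []) k "" =
                PySem.List.pyGetD (PySem.List.pyGetD t2 (R - 1) []) k "") else acc.2.2.1
  let s := if k < C then acc.2.2.2 && decide (PySem.List.pyGetD (PySem.List.pyGetD t1 (R - 1) []) k "" =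
                PySem.List.pyGetD (PySem.List.pyGetD t2 0 []) k "") else acc.2.2.2
  (w, e, n, s)

def day20_relative_position_alt (t1 : List (List String)) (t2 : List (List String)) : Option String :=
  let R : Int := t1.length
  let C : Int := (PySem.List.pyGetD t1 0 []).length
  let flags := (PySem.List.pyRange 0 (max R C) 1).foldl (pvStep t1 t2 R C) (true, true, true, true)
  if flags.1 then some "W"
  else if flags.2.1 then some "E"
  else if flags.2.2.1 then some "N"
  else if flags.2.2.2 then some "S"
  else none

-- ===== PRECONDITION & SPEC =====
-- Pre_ is the natural rectangular-tile domain (t1 nonempty, positive width C, t2 at least as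
-- tall, all rows of both at least C wide). It excludes ragged inputs on which A happens to
-- return "W"/"E" because an early check short-circuits before an out-of-range access; B's
-- fused pass evaluates all four edge comparisons and raises there (see claim.json cites).
def Pre_day20_relative_position (t1 : List (List String)) (t2 : List (List String)) : Prop :=
  0 < t1.length ∧ 0 < (t1.headD []).length ∧ t1.length ≤ t2.length ∧
  (∀ row ∈ t1, (t1.headD []).length ≤ row.length) ∧
  (∀ row ∈ t2.take t1.length, (t1.headD []).length ≤ row.length)
instance (t1 : List (List String)) (t2 : List (List String)) : Decidable (Pre_day20_relative_position t1 t2) := by unfold Pre_day20_relative_position; infer_instance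

def pvWitness_day20_relative_position : List (List String) × List (List String) := ([["a"]], [["b"]])

def Spec_day20_relative_position (t1 : List (List String)) (t2 : List (List String)) (out : Option String) : Prop := out = day20_relative_position_alt t1 t2
instance (t1 : List (List String)) (t2 : List (List String)) (out : Option String) : Decidable (Spec_day20_relative_position t1 t2 out) := by unfold Spec_day20_relative_position; infer_instance

-- ===== CLAIM =====
def Claim_equal_day20_relative_position : Prop := ∀ (t1 : List (List String)) (t2 : List (List String)), Dom_day20_relative_position t1 t2 → Pre_day20_relative_position t1 t2 → Spec_day20_relative_position t1 t2 (day20_relative_position t1 t2)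

-- ===== LEMMAS AND PROOFS =====

-- a guarded and-accumulating fold equals the all over the guarded sublist
theorem pv_foldl_guard_and (n : Int) (p : Int → Bool) (b : Bool) (l : List Int) :
    l.foldl (fun acc k => if k < n then acc && p k else acc) b
      = (b && (l.filter (fun k => decide (k < n))).all p) := by
  induction l generalizing b with
  | nil => simp
  | cons x xs ih =>
    by_cases h : x < n <;>
      simp [List.foldl_cons, ih, h, Bool.and_assoc]

-- the fused four-flag fold computes each flag independently
theorem pv_foldl_step (t1 t2 : List (List String)) (R C : Int) (l : List Int)
    (a : Bool × Bool × Bool × Bool) :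
    l.foldl (pvStep t1 t2 R C) a
      = (l.foldl (fun acc k => if k < R then acc && decide (PySem.List.pyGetD (PySem.List.pyGetD t1 k []) 0 "" =
                PySem.List.pyGetD (PySem.List.pyGetD t2 k []) (C - 1) "") else acc) a.1,
         l.foldl (fun acc k => if k < R then acc && decide (PySem.List.pyGetD (PySem.List.pyGetD t1 k []) (C - 1) "" =
                PySem.List.pyGetD (PySem.List.pyGetD t2 k []) 0 "") else acc) a.2.1,
         l.foldl (fun acc k => if k < C then acc && decide (PySem.List.pyGetD (PySem.List.pyGetD t1 0 []) k "" =
                PySem.List.pyGetD (PySem.List.pyGetD t2 (R - 1) []) k "") else acc) a.2.2.1,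
         l.foldl (fun acc k => if k < C then acc && decide (PySem.List.pyGetD (PySem.List.pyGetD t1 (R - 1) []) k "" =
                PySem.List.pyGetD (PySem.List.pyGetD t2 0 []) k "") else acc) a.2.2.2) := by
  induction l generalizing a with
  | nil => simp
  | cons x xs ih => simp [List.foldl_cons, ih, pvStep]

-- filtering range(0, M) by (· < n) gives range(0, n) when 0 ≤ n ≤ M
theorem pv_filter_range (M n : Int) (h0 : 0 ≤ n) (h : n ≤ M) :
    (PySem.List.pyRange 0 M 1).filter (fun k => decide (k < n)) = PySem.List.pyRange 0 n 1 := by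
  rw [PySem.List.pyRange_one_append 0 n M h0 h, List.filter_append]
  have h1 : (PySem.List.pyRange 0 n 1).filter (fun k => decide (k < n)) = PySem.List.pyRange 0 n 1 := by
    apply List.filter_eq_self.mpr
    intro a ha
    have := (PySem.List.mem_pyRange_one).mp ha
    simpa using this.2
  have h2 : (PySem.List.pyRange n M 1).filter (fun k => decide (k < n)) = [] := by
    apply List.filter_eq_nil_iff.mpr
    intro a ha
    have := (PySem.List.mem_pyRange_one).mp ha
    simpa using this.1
  rw [h1, h2, List.append_nil]

-- combining: the guarded fold over range(0, max R C) is all over range(0, n)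
theorem pv_fold_all (M n : Int) (p : Int → Bool) (h0 : 0 ≤ n) (h : n ≤ M) :
    (PySem.List.pyRange 0 M 1).foldl (fun acc k => if k < n then acc && p k else acc) true
      = (PySem.List.pyRange 0 n 1).all p := by
  rw [pv_foldl_guard_and, pv_filter_range M n h0 h, Bool.true_and]

theorem pv_all_map (l : List Int) (p : Int → Bool) :
    ((l.map p).all (fun b => b)) = l.all p := by
  simp [Function.comp_def]

theorem day20_relative_position_spec : Claim_equal_day20_relative_position := by
  intro t1 t2 _ hpre
  unfold Spec_day20_relative_position day20_relative_position day20_relative_position_alt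
  have hR : (0:Int) ≤ (t1.length : Int) := by positivity
  have hC : (0:Int) ≤ ((PySem.List.pyGetD t1 0 []).length : Int) := by positivity
  simp only [pv_foldl_step,
    pv_fold_all _ _ _ hR (le_max_left _ _), pv_fold_all _ _ _ hC (le_max_right _ _),
    pv_all_map]

-- ===== VERDICT =====
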